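-- pv_equiv track=rewrite | github.com/jacksonfellows/euler | python/090_Cube_digit_pairs.py | extend_die
-- ===== SOURCE A (Python) =====
-- def extend_die(die):
--     ext = set()
--     for x in die:
--         ext.add(x)
--         if x == 6:
--             ext.add(9)
--         elif x == 9:
--             ext.add(6)
--     return ext
-- ===== SOURCE B (Python) =====
-- def _extend_faces(faces):
--     # Divide and conquer: split the faces in half, extend each half, union the results.
--     # A one-face set is augmented with its 6/9 partner (15 - x swaps 6 and 9).
--     if len(faces) == 0:
--         return set()
--     if len(faces) == 1:
--         x = faces[0]
--         return {x, 15 - x} if x in (6, 9) else {x}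
--     mid = len(faces) // 2
--     return _extend_faces(faces[:mid]) | _extend_faces(faces[mid:])
--
--
-- def extend_die(die):
--     return _extend_faces(list(die))
-- ===== Notes on version B (the rewrite author's own statement) =====
-- stated objective: alternative
-- what changed: Replaces the imperative element-wise loop with conditional .add branches by a divide-and-conquer recursion that splits the list in half, extends each half, and merges with set union, the 6/9 swap expressed arithmetically as 15-x.
import Mathlib
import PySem

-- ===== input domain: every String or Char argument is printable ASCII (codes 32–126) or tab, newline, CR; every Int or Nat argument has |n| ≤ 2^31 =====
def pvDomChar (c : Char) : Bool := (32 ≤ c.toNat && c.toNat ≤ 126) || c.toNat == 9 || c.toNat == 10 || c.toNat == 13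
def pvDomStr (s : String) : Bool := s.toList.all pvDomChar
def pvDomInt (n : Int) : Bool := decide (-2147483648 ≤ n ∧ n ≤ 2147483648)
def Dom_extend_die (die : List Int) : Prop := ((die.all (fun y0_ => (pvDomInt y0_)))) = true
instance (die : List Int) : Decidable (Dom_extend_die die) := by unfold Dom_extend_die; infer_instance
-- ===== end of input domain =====

-- B replaces A's element-wise loop with conditional .add branches by a divide-and-conquer
-- recursion (split in half, extend halves, merge by set union), the 6/9 swap written as 15-x (alternative).


-- ===== PORT A =====
def extend_die (die : List Int) : List Int :=
  die.foldl (fun ext x =>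
    let ext := PySem.Set.add ext x
    if x == 6 then PySem.Set.add ext 9
    else if x == 9 then PySem.Set.add ext 6
    else ext) PySem.Set.empty

-- ===== PORT B =====
-- faces[:mid] / faces[mid:] are ported as take/drop, exact here since 0 ≤ mid ≤ len(faces).
def extend_faces (faces : List Int) : List Int :=
  match faces with
  | [] => PySem.Set.empty
  | [x] => if x == 6 || x == 9 then PySem.Set.ofList [x, 15 - x] else PySem.Set.ofList [x]
  | x :: y :: rest =>
      PySem.Set.union
        (extend_faces ((x :: y :: rest).take ((x :: y :: rest).length / 2)))
        (extend_faces ((x :: y :: rest).drop ((x :: y :: rest).length / 2)))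
termination_by faces.length
decreasing_by
  all_goals simp only [List.length_take, List.length_drop, List.length_cons]; omega

-- list(die) is the identity on the canonical distinct-element list.
def extend_die_alt (die : List Int) : List Int :=
  extend_faces die

-- ===== PRECONDITION & SPEC =====
def Spec_extend_die (die : List Int) (out : List Int) : Prop := out = extend_die_alt die
instance (die : List Int) (out : List Int) : Decidable (Spec_extend_die die out) := by unfold Spec_extend_die; infer_instance

-- ===== CLAIM (what is proved, stated in full; the proofs are below) =====
def Claim_equal_extend_die : Prop := ∀ (die : List Int), Dom_extend_die die → Spec_extend_die die (extend_die die)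

-- ===== LEMMAS AND PROOFS =====
-- each face's contribution, in A's insertion order
def pvAug (x : Int) : List Int := if x == 6 || x == 9 then [x, 15 - x] else [x]

lemma union_eq_update (s t : PySem.Set Int) : PySem.Set.union s t = PySem.Set.update s t := rfl

lemma update_ofList (v : List Int) (s : PySem.Set Int) :
    PySem.Set.update s (PySem.Set.ofList v) = PySem.Set.update s v := by
  induction v using List.reverseRecOn generalizing s with
  | nil => rfl
  | append_singleton v x ih =>
      rw [PySem.Set.ofList_append_singleton]
      by_cases hx : x ∈ PySem.Set.ofList v
      · rw [PySem.Set.add_of_mem hx, ih, PySem.Set.update_append]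
        have hmem : x ∈ List.foldl PySem.Set.add s v := by
          have h2 : x ∈ PySem.Set.update s v := by
            rw [PySem.Set.mem_update]; exact Or.inr ((PySem.Set.mem_ofList v x).mp hx)
          simpa [PySem.Set.update] using h2
        simp [PySem.Set.update]
        rw [PySem.Set.add_of_mem hmem]
      · rw [PySem.Set.add_of_not_mem hx, PySem.Set.update_append, ih, PySem.Set.update_append]

lemma alt_char (faces : List Int) :
    extend_faces faces = PySem.Set.ofList (faces.flatMap pvAug) := by
  induction faces using extend_faces.induct with
  | case1 => simp [extend_faces]
  | case2 x h =>
      simp only [extend_faces, List.flatMap_cons, List.flatMap_nil, List.append_nil, pvAug]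
      simp [h]
  | case3 x h =>
      simp only [extend_faces, List.flatMap_cons, List.flatMap_nil, List.append_nil, pvAug]
      simp [h]
  | case4 x y rest ih1 ih2 =>
      rw [extend_faces, ih1, ih2, union_eq_update, update_ofList,
        ← PySem.Set.ofList_append, ← List.flatMap_append, List.take_append_drop]

lemma step_eq (s : PySem.Set Int) (x : Int) :
    (let e := PySem.Set.add s x
     if x == 6 then PySem.Set.add e 9
     else if x == 9 then PySem.Set.add e 6
     else e) = List.foldl PySem.Set.add s (pvAug x) := by
  by_cases h6 : x = 6
  · subst h6; rfl
  · by_cases h9 : x = 9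
    · subst h9; rfl
    · simp only [pvAug, show (x == 6) = false from by simp [h6],
        show (x == 9) = false from by simp [h9], Bool.or_self, if_neg, Bool.false_eq_true,
        not_false_eq_true, List.foldl_cons, List.foldl_nil]

lemma a_char (die : List Int) (s : PySem.Set Int) :
    die.foldl (fun ext x =>
      let ext := PySem.Set.add ext x
      if x == 6 then PySem.Set.add ext 9
      else if x == 9 then PySem.Set.add ext 6
      else ext) s = List.foldl PySem.Set.add s (die.flatMap pvAug) := by
  induction die generalizing s with
  | nil => rfl
  | cons x xs ih =>
      simp only [List.foldl_cons, List.flatMap_cons, List.foldl_append]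
      rw [ih, step_eq]

-- ===== VERDICT (by name: the statement is the Claim_ definition above) =====
theorem extend_die_spec : Claim_equal_extend_die := by
  intro die _
  unfold Spec_extend_die extend_die extend_die_alt
  rw [a_char, alt_char, PySem.Set.ofList_eq_foldl]
  rfl
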